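-- pv_equiv track=rewrite | github.com/posl/comment_recommendation | script/mod_gen/1_time/ja/242_C/6.py | solve
-- ===== SOURCE A (Python) =====
-- def solve(n):
--     dp = [[0] * 10 for _ in range(n+1)]
--     for i in range(1,10):
--         dp[1][i] = 1
--     for i in range(1,n):
--         for j in range(10):
--             if j == 0:
--                 dp[i+1][j] = dp[i][j+1]
--             elif j == 9:
--                 dp[i+1][j] = dp[i][j-1]
--             else:
--                 dp[i+1][j] = (dp[i][j-1] + dp[i][j+1]) % 998244353
--     return sum(dp[n]) % 998244353
-- ===== SOURCE B (Python) =====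
-- def solve(n):
--     MOD = 998244353
--     M = [[1 if abs(i - j) == 1 else 0 for j in range(10)] for i in range(10)]
--
--     def matmul(A, B):
--         return [[sum(A[i][k] * B[k][j] for k in range(10)) % MOD
--                  for j in range(10)] for i in range(10)]
--
--     def matpow(A, e):
--         if e == 0:
--             return [[1 if i == j else 0 for j in range(10)] for i in range(10)]
--         H = matpow(A, e // 2)
--         HH = matmul(H, H)
--         return matmul(A, HH) if e % 2 else HH
--
--     R = matpow(M, n - 1)
--     s = [0] + [1] * 9
--     v = [sum(R[i][j] * s[j] for j in range(10)) % MOD for i in range(10)]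
--     return sum(v) % MOD
-- ===== Notes on version B (the rewrite author's own statement) =====
-- stated objective: faster
-- what changed: replaces the O(n) row-by-row DP table with exponentiation-by-squaring of the 10x10 path-graph transition matrix mod 998244353, applied to the start vector
import Mathlib
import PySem

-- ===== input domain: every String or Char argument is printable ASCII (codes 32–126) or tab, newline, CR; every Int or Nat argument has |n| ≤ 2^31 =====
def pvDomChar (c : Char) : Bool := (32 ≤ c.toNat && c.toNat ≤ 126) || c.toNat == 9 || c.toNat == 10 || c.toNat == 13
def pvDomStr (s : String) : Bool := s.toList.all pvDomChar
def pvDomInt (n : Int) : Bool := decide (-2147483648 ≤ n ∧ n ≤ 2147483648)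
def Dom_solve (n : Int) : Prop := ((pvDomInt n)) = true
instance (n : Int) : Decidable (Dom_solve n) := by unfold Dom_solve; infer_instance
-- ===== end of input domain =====

-- Re-implementation note: solve (port of A) builds the full (n+1)x10 DP table row by row, O(n);
-- solve_alt (port of B) computes the same count by exponentiation-by-squaring of the 10x10
-- path-graph transition matrix mod 998244353, O(log n) matrix operations (measurably faster).

-- ===== PORT A =====
-- dp[i] read/write on the table: exact for Python's dp[i] whenever 0 <= i < len(dp),
-- which holds for every access below on inputs admitted by Pre_solve.
def pvAGet (dp : Array (List Int)) (i : Int) : List Int := dp.getD i.toNat []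
def pvASet (dp : Array (List Int)) (i : Int) (v : List Int) : Array (List Int) :=
  dp.setIfInBounds i.toNat v

def solve (n : Int) : Int :=
  let dp0 : Array (List Int) :=
    ((PySem.List.pyRange 0 (n+1) 1).map (fun _ => List.replicate 10 (0:Int))).toArray
  let dp1 := (PySem.List.pyRange 1 10 1).foldl
      (fun dp i => pvASet dp 1 (PySem.List.pySetD (pvAGet dp 1) i 1)) dp0
  let dp2 := (PySem.List.pyRange 1 n 1).foldl
      (fun dp i =>
        (PySem.List.pyRange 0 10 1).foldl
          (fun dp j =>
            let v : Int :=
              if j = 0 then PySem.List.pyGetD (pvAGet dp i) (j+1) 0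
              else if j = 9 then PySem.List.pyGetD (pvAGet dp i) (j-1) 0
              else PySem.Int.mod (PySem.List.pyGetD (pvAGet dp i) (j-1) 0
                     + PySem.List.pyGetD (pvAGet dp i) (j+1) 0) 998244353
            pvASet dp (i+1) (PySem.List.pySetD (pvAGet dp (i+1)) j v)) dp)
      dp1
  PySem.Int.mod (pvAGet dp2 n).sum 998244353

-- ===== PORT B =====
def pvMatmul (A B : List (List Int)) : List (List Int) :=
  (PySem.List.pyRange 0 10 1).map (fun i =>
    (PySem.List.pyRange 0 10 1).map (fun j =>
      PySem.Int.mod (((PySem.List.pyRange 0 10 1).map (fun k =>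
        PySem.List.pyGetD (PySem.List.pyGetD A i []) k 0 *
        PySem.List.pyGetD (PySem.List.pyGetD B k []) j 0)).sum) 998244353))

def pvIdent : List (List Int) :=
  (PySem.List.pyRange 0 10 1).map (fun i =>
    (PySem.List.pyRange 0 10 1).map (fun j => if i = j then (1:Int) else 0))

def pvMatpowN (A : List (List Int)) : Nat → List (List Int)
  | 0 => pvIdent
  | (e+1) =>
    let H := pvMatpowN A ((e+1)/2)
    let HH := pvMatmul H H
    if (e+1) % 2 = 1 then pvMatmul A HH else HH
decreasing_by omega


def solve_alt (n : Int) : Int :=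
  let M : List (List Int) := (PySem.List.pyRange 0 10 1).map (fun i =>
    (PySem.List.pyRange 0 10 1).map (fun j => if (i - j).natAbs = 1 then (1:Int) else 0))
  let R := pvMatpowN M (n-1).toNat
  let s : List Int := [0] ++ List.replicate 9 (1:Int)
  let v := (PySem.List.pyRange 0 10 1).map (fun i =>
    PySem.Int.mod (((PySem.List.pyRange 0 10 1).map (fun j =>
      PySem.List.pyGetD (PySem.List.pyGetD R i []) j 0 * PySem.List.pyGetD s j 0)).sum) 998244353)
  PySem.Int.mod v.sum 998244353


-- ===== PRECONDITION & SPEC =====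
-- Pre_solve: the Python A raises IndexError for every n ≤ 0 (dp[1] does not exist); it returns
-- normally exactly when n ≥ 1.
def Pre_solve (n : Int) : Prop := 1 ≤ n
instance (n : Int) : Decidable (Pre_solve n) := by unfold Pre_solve; infer_instance
def pvWitness_solve : Int := (3)
def Spec_solve (n : Int) (out : Int) : Prop := out = solve_alt n
instance (n : Int) (out : Int) : Decidable (Spec_solve n out) := by unfold Spec_solve; infer_instance

-- ===== CLAIM (what is proved, stated in full; the proofs are below) =====
def Claim_equal_solve : Prop := ∀ (n : Int), Dom_solve n → Pre_solve n → Spec_solve n (solve n)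

-- ===== LEMMAS AND PROOFS =====
def pvDot (a b : List Int) : Int := (List.zipWith (· * ·) a b).sum
def pvCol (B : List (List Int)) (j : Nat) : List Int := B.map (fun r => r.getD j 0)
def pvApply (A : List (List Int)) (v : List Int) : List Int :=
  A.map (fun r => PySem.Int.mod (pvDot r v) 998244353)
def pvShape (A : List (List Int)) : Prop := A.length = 10 ∧ ∀ r ∈ A, r.length = 10

theorem pvLen10 {α : Type} (v : List α) (h : v.length = 10) :
    ∃ a b c d e f g h' i j, v = [a,b,c,d,e,f,g,h',i,j] := by
  rcases v with _|⟨a,_|⟨b,_|⟨c,_|⟨d,_|⟨e,_|⟨f,_|⟨g,_|⟨h',_|⟨i,_|⟨j,_|⟨k,t⟩⟩⟩⟩⟩⟩⟩⟩⟩⟩⟩ <;>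
    simp_all

theorem pvGetD_range_self {α : Type} (r : List α) (d : α) (n : Nat) (h : r.length = n) :
    (List.range n).map (fun j => r.getD j d) = r := by
  induction n generalizing r with
  | zero => rw [List.length_eq_zero_iff] at h; subst h; rfl
  | succ m ih =>
    cases r with
    | nil => simp at h
    | cons a as =>
      rw [List.range_succ_eq_map]
      simp only [List.map_cons, List.map_map, List.getD_cons_zero]
      have hc : ((fun j : Nat => (a::as).getD j d) ∘ Nat.succ) = (fun j : Nat => as.getD j d) := by
        funext k; simp
      rw [hc, ih as (by simpa using h)]

theorem pvMapPyRange10 {α : Type} (g : List Int → α) (xs : List (List Int)) (h : xs.length = 10) :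
    (PySem.List.pyRange 0 (10:Int) 1).map (fun i => g (PySem.List.pyGetD xs i [])) = xs.map g := by
  have h10 : (10 : Int) = ((10 : Nat) : Int) := by norm_num
  rw [h10, PySem.List.pyRange_zero_natCast, List.map_map]
  have hc : ((fun i : Int => g (PySem.List.pyGetD xs i [])) ∘ (fun k : Nat => (k : Int)))
      = (fun k : Nat => g (xs.getD k [])) := by
    funext k; simp [PySem.List.pyGetD_natCast]
  rw [hc]
  rw [show (fun k : Nat => g (xs.getD k [])) = (fun r => g r) ∘ (fun k : Nat => xs.getD k []) from rfl]
  rw [← List.map_map, pvGetD_range_self xs [] 10 h]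

theorem pvShape_matmul (A B : List (List Int)) : pvShape (pvMatmul A B) := by
  constructor
  · simp [pvMatmul, PySem.List.length_pyRange_one]
  · intro r hr
    simp only [pvMatmul, List.mem_map] at hr
    obtain ⟨i, _, rfl⟩ := hr
    simp [PySem.List.length_pyRange_one]

theorem pvShape_ident : pvShape pvIdent := by
  constructor
  · simp [pvIdent, PySem.List.length_pyRange_one]
  · intro r hr
    simp only [pvIdent, List.mem_map] at hr
    obtain ⟨i, _, rfl⟩ := hr
    simp [PySem.List.length_pyRange_one]

theorem pvMatmul_eq (A B : List (List Int)) (hA : pvShape A) (hB : B.length = 10) :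
    pvMatmul A B = A.map (fun a => (List.range 10).map
      (fun j => PySem.Int.mod (pvDot a (pvCol B j)) 998244353)) := by
  obtain ⟨hA1, hA2⟩ := hA
  unfold pvMatmul
  rw [pvMapPyRange10 (fun a => (PySem.List.pyRange 0 10 1).map (fun j =>
    PySem.Int.mod (((PySem.List.pyRange 0 10 1).map (fun k =>
      PySem.List.pyGetD a k 0 * PySem.List.pyGetD (PySem.List.pyGetD B k []) j 0)).sum) 998244353)) A hA1]
  apply List.map_congr_left
  intro a ha
  obtain ⟨a0,a1,a2,a3,a4,a5,a6,a7,a8,a9,rfl⟩ := pvLen10 a (hA2 a ha)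
  obtain ⟨r0,r1,r2,r3,r4,r5,r6,r7,r8,r9,rfl⟩ := pvLen10 B hB
  simp only [show PySem.List.pyRange 0 10 1 = [0,1,2,3,4,5,6,7,8,9] from by decide,
    show List.range 10 = [0,1,2,3,4,5,6,7,8,9] from by decide,
    List.map_cons, List.map_nil, List.sum_cons, List.sum_nil,
    pvCol, pvDot, List.zipWith, PySem.List.pyGetD_ofNat', List.getD, List.getElem?_cons_zero,
    List.getElem?_cons_succ, Option.getD_some]

theorem pvDot_nil_right (a : List Int) : pvDot a [] = 0 := by cases a <;> rfl
theorem pvDot_cons (x : Int) (a : List Int) (y : Int) (b : List Int) :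
    pvDot (x :: a) (y :: b) = x * y + pvDot a b := by simp [pvDot]

theorem pvDot_map_zero {α : Type} (l : List α) (v : List Int) :
    pvDot (l.map (fun _ => (0:Int))) v = 0 := by
  induction l generalizing v with
  | nil => rfl
  | cons a as ih => cases v with
    | nil => rw [pvDot_nil_right]
    | cons b bs => rw [List.map_cons, pvDot_cons, ih bs]; ring

theorem pvDot_map_add {α : Type} (l : List α) (f g : α → Int) (v : List Int) :
    pvDot (l.map (fun j => f j + g j)) v = pvDot (l.map f) v + pvDot (l.map g) v := by
  induction l generalizing v with
  | nil => rfl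
  | cons a as ih => cases v with
    | nil => simp [pvDot_nil_right]
    | cons b bs => simp [pvDot_cons, ih]; ring

theorem pvDot_map_smul {α : Type} (l : List α) (c : Int) (f : α → Int) (v : List Int) :
    pvDot (l.map (fun j => c * f j)) v = c * pvDot (l.map f) v := by
  induction l generalizing v with
  | nil => simp [pvDot]
  | cons a as ih => cases v with
    | nil => simp [pvDot_nil_right]
    | cons b bs => simp [pvDot_cons, ih]; ring

theorem pvExchange (a : List Int) (B : List (List Int)) (v : List Int)
    (hB : ∀ r ∈ B, r.length = v.length) (hlen : B.length = a.length) :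
    pvDot ((List.range v.length).map (fun j => pvDot a (B.map (fun r => r.getD j 0)))) v
      = pvDot a (B.map (fun r => pvDot r v)) := by
  induction a generalizing B with
  | nil =>
    have : B = [] := by rw [← List.length_eq_zero_iff]; simpa using hlen
    subst this
    simp only [List.map_nil, pvDot]
    simpa using pvDot_map_zero (List.range v.length) v
  | cons x as ih =>
    cases B with
    | nil => simp at hlen
    | cons r B' =>
      simp only [List.map_cons, pvDot_cons]
      rw [pvDot_map_add, pvDot_map_smul, pvGetD_range_self r 0 v.length (hB r List.mem_cons_self),
        ih B' (fun s hs => hB s (List.mem_cons_of_mem _ hs)) (by simpa using hlen)]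

-- mod lemmas
theorem pvMod_mod (t : Int) :
    PySem.Int.mod (PySem.Int.mod t 998244353) 998244353 = PySem.Int.mod t 998244353 := by
  simp only [PySem.Int.mod_eq_emod_of_pos (by norm_num : (0:Int) < 998244353)]
  exact Int.emod_emod_of_dvd t dvd_rfl

theorem pvDot_mod_right (x y : List Int) :
    PySem.Int.mod (pvDot x (y.map (fun t => PySem.Int.mod t 998244353))) 998244353
      = PySem.Int.mod (pvDot x y) 998244353 := by
  simp only [PySem.Int.mod_eq_emod_of_pos (by norm_num : (0:Int) < 998244353)]
  induction x generalizing y with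
  | nil => rfl
  | cons x xs ih =>
    cases y with
    | nil => rfl
    | cons b bs =>
      simp only [List.map_cons, pvDot_cons]
      rw [Int.add_emod, Int.mul_emod, Int.emod_emod_of_dvd b dvd_rfl, ← Int.mul_emod, ih bs, ← Int.add_emod]

theorem pvDot_mod_left (x y : List Int) :
    PySem.Int.mod (pvDot (x.map (fun t => PySem.Int.mod t 998244353)) y) 998244353
      = PySem.Int.mod (pvDot x y) 998244353 := by
  simp only [PySem.Int.mod_eq_emod_of_pos (by norm_num : (0:Int) < 998244353)]
  induction x generalizing y with
  | nil => rfl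
  | cons x xs ih =>
    cases y with
    | nil => simp [pvDot_nil_right]
    | cons b bs =>
      simp only [List.map_cons, pvDot_cons]
      rw [Int.add_emod, Int.mul_emod, Int.emod_emod_of_dvd x dvd_rfl, ← Int.mul_emod, ih bs, ← Int.add_emod]

theorem pvApply_matmul (A B : List (List Int)) (v : List Int)
    (hA : pvShape A) (hB : pvShape B) (hv : v.length = 10) :
    pvApply (pvMatmul A B) v = pvApply A (pvApply B v) := by
  rw [pvMatmul_eq A B hA hB.1]
  unfold pvApply
  rw [List.map_map]
  apply List.map_congr_left
  intro a ha
  simp only [Function.comp]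
  have h1 : (List.range 10).map (fun j => PySem.Int.mod (pvDot a (pvCol B j)) 998244353)
      = ((List.range 10).map (fun j => pvDot a (pvCol B j))).map (fun t => PySem.Int.mod t 998244353) := by
    rw [List.map_map]; rfl
  have h2 : B.map (fun r => PySem.Int.mod (pvDot r v) 998244353)
      = (B.map (fun r => pvDot r v)).map (fun t => PySem.Int.mod t 998244353) := by
    rw [List.map_map]; rfl
  rw [h1, pvDot_mod_left, h2, pvDot_mod_right]
  congr 1
  have he := pvExchange a B v (fun r hr => by rw [hB.2 r hr, hv]) (by rw [hB.1, hA.2 a ha])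
  rw [hv] at he
  exact he

theorem pvApply_ident (v : List Int) (hv : v.length = 10) :
    pvApply pvIdent v = v.map (fun t => PySem.Int.mod t 998244353) := by
  obtain ⟨v0,v1,v2,v3,v4,v5,v6,v7,v8,v9,rfl⟩ := pvLen10 v hv
  rw [show pvIdent = [[1,0,0,0,0,0,0,0,0,0],[0,1,0,0,0,0,0,0,0,0],[0,0,1,0,0,0,0,0,0,0],
    [0,0,0,1,0,0,0,0,0,0],[0,0,0,0,1,0,0,0,0,0],[0,0,0,0,0,1,0,0,0,0],[0,0,0,0,0,0,1,0,0,0],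
    [0,0,0,0,0,0,0,1,0,0],[0,0,0,0,0,0,0,0,1,0],[0,0,0,0,0,0,0,0,0,1]] from by decide]
  simp only [pvApply, pvDot, List.zipWith, List.map_cons, List.map_nil, List.sum_cons, List.sum_nil]
  norm_num

theorem pvSum_range_getD (n : Nat) (x y : List Int) (hx : x.length = n) (hy : y.length = n) :
    ((List.range n).map (fun k => x.getD k 0 * y.getD k 0)).sum = pvDot x y := by
  induction n generalizing x y with
  | zero =>
    rw [List.length_eq_zero_iff] at hx hy; subst hx; subst hy; rfl
  | succ m ih =>
    cases x with
    | nil => simp at hx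
    | cons a as =>
      cases y with
      | nil => simp at hy
      | cons b bs =>
        rw [List.range_succ_eq_map]
        simp only [List.map_cons, List.map_map, List.sum_cons, pvDot_cons, List.getD_cons_zero]
        have hc : ((fun k : Nat => (a::as).getD k 0 * (b::bs).getD k 0) ∘ Nat.succ)
            = (fun k : Nat => as.getD k 0 * bs.getD k 0) := by
          funext k; simp
        rw [hc, ih as bs (by simpa using hx) (by simpa using hy)]

theorem pvSum_pyRange_getD (x y : List Int) (hx : x.length = 10) (hy : y.length = 10) :
    ((PySem.List.pyRange 0 (10 : Int) 1).map
      (fun k => PySem.List.pyGetD x k 0 * PySem.List.pyGetD y k 0)).sum = pvDot x y := by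
  have h10 : (10 : Int) = ((10 : Nat) : Int) := by norm_num
  rw [h10, PySem.List.pyRange_zero_natCast, List.map_map]
  have hc : ((fun k : Int => PySem.List.pyGetD x k 0 * PySem.List.pyGetD y k 0) ∘ (fun k : Nat => (k : Int)))
      = (fun k : Nat => x.getD k 0 * y.getD k 0) := by
    funext k; simp [PySem.List.pyGetD_natCast]
  rw [hc, pvSum_range_getD 10 x y hx hy]

def pvMlit : List (List Int) :=
  [[0,1,0,0,0,0,0,0,0,0],[1,0,1,0,0,0,0,0,0,0],[0,1,0,1,0,0,0,0,0,0],[0,0,1,0,1,0,0,0,0,0],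
   [0,0,0,1,0,1,0,0,0,0],[0,0,0,0,1,0,1,0,0,0],[0,0,0,0,0,1,0,1,0,0],[0,0,0,0,0,0,1,0,1,0],
   [0,0,0,0,0,0,0,1,0,1],[0,0,0,0,0,0,0,0,1,0]]

theorem pvShape_matpow (A : List (List Int)) (e : Nat) : pvShape (pvMatpowN A e) := by
  induction e using Nat.strong_induction_on with
  | _ e ih =>
    cases e with
    | zero => rw [pvMatpowN]; exact pvShape_ident
    | succ m =>
      rw [pvMatpowN]
      split
      · exact pvShape_matmul _ _
      · exact pvShape_matmul _ _

theorem pvLen_apply (A : List (List Int)) (v : List Int) : (pvApply A v).length = A.length := by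
  simp [pvApply]

theorem pvMod_idem_apply (A : List (List Int)) (v : List Int) :
    (pvApply A v).map (fun t => PySem.Int.mod t 998244353) = pvApply A v := by
  unfold pvApply
  rw [List.map_map]
  apply List.map_congr_left
  intro r _
  exact pvMod_mod _

theorem pvMod_idem_map (v : List Int) :
    ((v.map (fun t => PySem.Int.mod t 998244353)).map (fun t => PySem.Int.mod t 998244353))
      = v.map (fun t => PySem.Int.mod t 998244353) := by
  rw [List.map_map]
  apply List.map_congr_left
  intro t _
  exact pvMod_mod t

theorem pvLen_iter (k : Nat) (w : List Int) (hw : w.length = 10) :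
    ((fun u => pvApply pvMlit u)^[k] w).length = 10 := by
  induction k generalizing w with
  | zero => simpa using hw
  | succ m ih =>
    rw [Function.iterate_succ_apply]
    exact ih _ (by rw [pvLen_apply]; decide)

theorem pvIter_mod_idem (k : Nat) (w : List Int) :
    ((fun u => pvApply pvMlit u)^[k] (w.map (fun t => PySem.Int.mod t 998244353))).map
        (fun t => PySem.Int.mod t 998244353)
      = (fun u => pvApply pvMlit u)^[k] (w.map (fun t => PySem.Int.mod t 998244353)) := by
  cases k with
  | zero => simp [pvMod_idem_map w]
  | succ m => rw [Function.iterate_succ_apply']; exact pvMod_idem_apply _ _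

theorem pvMatpow_apply (e : Nat) (v : List Int) (hv : v.length = 10) :
    pvApply (pvMatpowN pvMlit e) v
      = (fun w => pvApply pvMlit w)^[e] (v.map (fun t => PySem.Int.mod t 998244353)) := by
  induction e using Nat.strong_induction_on generalizing v with
  | _ e ih =>
    cases e with
    | zero =>
      rw [pvMatpowN]
      simp [pvApply_ident v hv]
    | succ m =>
      rw [pvMatpowN]
      have hMl : pvShape pvMlit := by constructor <;> decide
      set k := (m+1)/2 with hkd
      have hk : k < m+1 := by omega
      have hH : pvShape (pvMatpowN pvMlit k) := pvShape_matpow _ _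
      have hHH : ∀ w : List Int, w.length = 10 →
          pvApply (pvMatmul (pvMatpowN pvMlit k) (pvMatpowN pvMlit k)) w
            = (fun u => pvApply pvMlit u)^[k + k]
                (w.map (fun t => PySem.Int.mod t 998244353)) := by
        intro w hw
        rw [pvApply_matmul _ _ _ hH hH hw, ih _ hk _ hw]
        have hlen : ((fun u => pvApply pvMlit u)^[k]
            (w.map (fun t => PySem.Int.mod t 998244353))).length = 10 :=
          pvLen_iter _ _ (by rw [List.length_map]; exact hw)
        rw [ih _ hk _ hlen, pvIter_mod_idem, ← Function.iterate_add_apply]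
      by_cases hpar : (m+1) % 2 = 1
      · rw [if_pos hpar, pvApply_matmul _ _ _ hMl (pvShape_matmul _ _) hv, hHH v hv,
          show m + 1 = (k + k) + 1 by omega, Function.iterate_succ_apply']
      · rw [if_neg hpar, hHH v hv, show k + k = m + 1 by omega]

def pvStep (r : List Int) : List Int :=
  [PySem.List.pyGetD r 1 0,
   PySem.Int.mod (PySem.List.pyGetD r 0 0 + PySem.List.pyGetD r 2 0) 998244353,
   PySem.Int.mod (PySem.List.pyGetD r 1 0 + PySem.List.pyGetD r 3 0) 998244353,
   PySem.Int.mod (PySem.List.pyGetD r 2 0 + PySem.List.pyGetD r 4 0) 998244353,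
   PySem.Int.mod (PySem.List.pyGetD r 3 0 + PySem.List.pyGetD r 5 0) 998244353,
   PySem.Int.mod (PySem.List.pyGetD r 4 0 + PySem.List.pyGetD r 6 0) 998244353,
   PySem.Int.mod (PySem.List.pyGetD r 5 0 + PySem.List.pyGetD r 7 0) 998244353,
   PySem.Int.mod (PySem.List.pyGetD r 6 0 + PySem.List.pyGetD r 8 0) 998244353,
   PySem.Int.mod (PySem.List.pyGetD r 7 0 + PySem.List.pyGetD r 9 0) 998244353,
   PySem.List.pyGetD r 8 0]

def pvStart : List Int := [0,1,1,1,1,1,1,1,1,1]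

def pvV (prev : List Int) (j : Int) : Int :=
  if j = 0 then PySem.List.pyGetD prev (j+1) 0
  else if j = 9 then PySem.List.pyGetD prev (j-1) 0
  else PySem.Int.mod (PySem.List.pyGetD prev (j-1) 0 + PySem.List.pyGetD prev (j+1) 0) 998244353

theorem pvGetSet {α : Type} (xs : List α) (i m : Int) (v d : α)
    (hi : 0 ≤ i) (hlt : i < (xs.length : Int)) (hm : 0 ≤ m) :
    PySem.List.pyGetD (PySem.List.pySetD xs i v) m d
      = if m = i then v else PySem.List.pyGetD xs m d := by
  obtain ⟨a, rfl⟩ : ∃ a : Nat, i = (a : Int) := ⟨i.toNat, by omega⟩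
  obtain ⟨b, rfl⟩ : ∃ b : Nat, m = (b : Int) := ⟨m.toNat, by omega⟩
  rw [PySem.List.pyGetD_pySetD_natCast xs a b v d (by exact_mod_cast hlt)]
  by_cases h : b = a
  · simp [h]
  · rw [if_neg h, if_neg (by exact_mod_cast h)]

theorem pvRow1Fold (L : List Int) (dp : List (List Int))
    (h1 : (1 : Int) < (dp.length : Int)) (hL : ∀ x ∈ L, 0 ≤ x) :
    (L.foldl (fun dp i => PySem.List.pySetD dp 1 (PySem.List.pySetD (PySem.List.pyGetD dp 1 []) i 1)) dp).length = dp.length ∧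
    PySem.List.pyGetD (L.foldl (fun dp i => PySem.List.pySetD dp 1 (PySem.List.pySetD (PySem.List.pyGetD dp 1 []) i 1)) dp) 1 []
      = L.foldl (fun r i => PySem.List.pySetD r i 1) (PySem.List.pyGetD dp 1 []) ∧
    (∀ m : Int, 0 ≤ m → m ≠ 1 →
      PySem.List.pyGetD (L.foldl (fun dp i => PySem.List.pySetD dp 1 (PySem.List.pySetD (PySem.List.pyGetD dp 1 []) i 1)) dp) m []
        = PySem.List.pyGetD dp m []) := by
  induction L generalizing dp with
  | nil => exact ⟨rfl, rfl, fun _ _ _ => rfl⟩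
  | cons x xs ih =>
    simp only [List.foldl_cons]
    have hg := pvGetSet dp 1 1 (PySem.List.pySetD (PySem.List.pyGetD dp 1 []) x 1) [] (by norm_num) h1 (by norm_num)
    rw [if_pos rfl] at hg
    have hlen : (PySem.List.pySetD dp 1 (PySem.List.pySetD (PySem.List.pyGetD dp 1 []) x 1)).length = dp.length :=
      PySem.List.length_pySetD _ _ _
    obtain ⟨ih1, ih2, ih3⟩ := ih _ (by rw [hlen]; exact h1) (fun y hy => hL y (List.mem_cons_of_mem _ hy))
    refine ⟨by rw [ih1, hlen], ?_, ?_⟩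
    · rw [ih2, hg]
    · intro m hm hm1
      rw [ih3 m hm hm1, pvGetSet dp 1 m _ [] (by norm_num) h1 hm, if_neg hm1]

theorem pvInnerFold (L : List Int) (i : Int) (dp : List (List Int))
    (hi : 0 ≤ i) (hlt : i + 1 < (dp.length : Int)) (hL : ∀ x ∈ L, 0 ≤ x) :
    ((L.foldl (fun dp j => PySem.List.pySetD dp (i+1)
        (PySem.List.pySetD (PySem.List.pyGetD dp (i+1) []) j (pvV (PySem.List.pyGetD dp i []) j))) dp).length = dp.length) ∧
    (PySem.List.pyGetD (L.foldl (fun dp j => PySem.List.pySetD dp (i+1)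
        (PySem.List.pySetD (PySem.List.pyGetD dp (i+1) []) j (pvV (PySem.List.pyGetD dp i []) j))) dp) (i+1) []
      = L.foldl (fun r j => PySem.List.pySetD r j (pvV (PySem.List.pyGetD dp i []) j)) (PySem.List.pyGetD dp (i+1) [])) ∧
    (∀ m : Int, 0 ≤ m → m ≠ i + 1 →
      PySem.List.pyGetD (L.foldl (fun dp j => PySem.List.pySetD dp (i+1)
        (PySem.List.pySetD (PySem.List.pyGetD dp (i+1) []) j (pvV (PySem.List.pyGetD dp i []) j))) dp) m []
        = PySem.List.pyGetD dp m []) := by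
  induction L generalizing dp with
  | nil => exact ⟨rfl, rfl, fun _ _ _ => rfl⟩
  | cons x xs ih =>
    simp only [List.foldl_cons]
    set dp' := PySem.List.pySetD dp (i+1)
        (PySem.List.pySetD (PySem.List.pyGetD dp (i+1) []) x (pvV (PySem.List.pyGetD dp i []) x)) with hdp'
    have hlen : dp'.length = dp.length := PySem.List.length_pySetD _ _ _
    have hrow : PySem.List.pyGetD dp' (i+1) []
        = PySem.List.pySetD (PySem.List.pyGetD dp (i+1) []) x (pvV (PySem.List.pyGetD dp i []) x) := by
      rw [hdp', pvGetSet dp (i+1) (i+1) _ [] (by omega) hlt (by omega), if_pos rfl]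
    have hprev : PySem.List.pyGetD dp' i [] = PySem.List.pyGetD dp i [] := by
      rw [hdp', pvGetSet dp (i+1) i _ [] (by omega) hlt hi, if_neg (by omega)]
    obtain ⟨ih1, ih2, ih3⟩ := ih dp' (by rw [hlen]; exact hlt) (fun y hy => hL y (List.mem_cons_of_mem _ hy))
    refine ⟨by rw [ih1, hlen], ?_, ?_⟩
    · rw [ih2, hrow, hprev]
    · intro m hm hm1
      rw [ih3 m hm hm1, hdp', pvGetSet dp (i+1) m _ [] (by omega) hlt hm, if_neg hm1]

theorem pvRowEval (prev : List Int) :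
    (([0,1,2,3,4,5,6,7,8,9] : List Int).foldl
        (fun r j => PySem.List.pySetD r j (pvV prev j)) (List.replicate 10 (0:Int)))
      = pvStep prev := by
  simp only [List.foldl_cons, List.foldl_nil, pvV]
  norm_num [PySem.List.pySetD_of_nonneg, pvStep]
  simp only [show ((2:Int).toNat) = 2 from rfl, show ((3:Int).toNat) = 3 from rfl,
    show ((4:Int).toNat) = 4 from rfl, show ((5:Int).toNat) = 5 from rfl,
    show ((6:Int).toNat) = 6 from rfl, show ((7:Int).toNat) = 7 from rfl,
    show ((8:Int).toNat) = 8 from rfl, show ((9:Int).toNat) = 9 from rfl]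
  apply List.ext_getElem
  · simp
  · intro i h1 h2
    simp only [List.length_set, List.length_replicate] at h1
    interval_cases i <;> simp

theorem pvRow1Eval :
    (([1,2,3,4,5,6,7,8,9] : List Int).foldl
        (fun r i => PySem.List.pySetD r i (1:Int)) (List.replicate 10 (0:Int))) = pvStart := by
  decide

def pvOuter (dp : List (List Int)) (i : Int) : List (List Int) :=
  (PySem.List.pyRange 0 10 1).foldl
    (fun dp j => PySem.List.pySetD dp (i+1)
      (PySem.List.pySetD (PySem.List.pyGetD dp (i+1) []) j (pvV (PySem.List.pyGetD dp i []) j))) dp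

def pvDp0 (n : Int) : List (List Int) :=
  (PySem.List.pyRange 0 (n+1) 1).map (fun _ => List.replicate 10 (0:Int))

def pvDp1 (n : Int) : List (List Int) :=
  (PySem.List.pyRange 1 10 1).foldl
    (fun dp i => PySem.List.pySetD dp 1 (PySem.List.pySetD (PySem.List.pyGetD dp 1 []) i 1)) (pvDp0 n)

theorem pvDp0_len (n : Int) : ((pvDp0 n).length : Int) = (n+1).toNat := by
  simp [pvDp0, PySem.List.length_pyRange_one]

theorem pvDp0_get (n : Int) (j : Int) (h0 : 0 ≤ j) (hj : j < n+1) :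
    PySem.List.pyGetD (pvDp0 n) j [] = List.replicate 10 0 := by
  unfold pvDp0
  rw [PySem.List.pyGetD_map_pyRange_of_nonneg _ (n+1) j [] h0 hj]

theorem pvDp1_facts (n : Int) (hn : 1 ≤ n) :
    ((pvDp1 n).length = (n+1).toNat) ∧
    (PySem.List.pyGetD (pvDp1 n) 1 [] = pvStart) ∧
    (∀ m : Int, 0 ≤ m → m ≠ 1 → m < n + 1 → PySem.List.pyGetD (pvDp1 n) m [] = List.replicate 10 0) := by
  have hlen : ((pvDp0 n).length : Int) = n + 1 := by
    rw [pvDp0_len]; omega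
  have h1 : (1:Int) < ((pvDp0 n).length : Int) := by omega
  obtain ⟨f1, f2, f3⟩ := pvRow1Fold (PySem.List.pyRange 1 10 1) (pvDp0 n) h1
    (fun x hx => by rw [PySem.List.mem_pyRange_one] at hx; omega)
  refine ⟨?_, ?_, ?_⟩
  · show (pvDp1 n).length = (n+1).toNat
    rw [pvDp1, f1]; omega
  · show PySem.List.pyGetD (pvDp1 n) 1 [] = pvStart
    rw [pvDp1, f2, pvDp0_get n 1 (by norm_num) (by omega),
      show PySem.List.pyRange 1 10 1 = [1,2,3,4,5,6,7,8,9] from by decide, pvRow1Eval]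
  · intro m hm hm1 hmlt
    rw [pvDp1, f3 m hm hm1, pvDp0_get n m hm hmlt]

set_option maxHeartbeats 800000 in
theorem pvMain (n : Int) (hn : 1 ≤ n) (m : Nat) (hm : (m:Int) ≤ n - 1) :
    (((List.range m).foldl (fun (dp : List (List Int)) (k : Nat) => pvOuter dp (1 + (k:Int))) (pvDp1 n)).length = (n+1).toNat) ∧
    (PySem.List.pyGetD ((List.range m).foldl (fun (dp : List (List Int)) (k : Nat) => pvOuter dp (1 + (k:Int))) (pvDp1 n)) ((m:Int)+1) []
      = pvStep^[m] pvStart) ∧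
    (∀ j : Int, (m:Int)+1 < j → j < n+1 →
      PySem.List.pyGetD ((List.range m).foldl (fun (dp : List (List Int)) (k : Nat) => pvOuter dp (1 + (k:Int))) (pvDp1 n)) j []
        = List.replicate 10 0) := by
  induction m with
  | zero =>
    simp only [List.range_zero, List.foldl_nil, Nat.cast_zero, zero_add]
    obtain ⟨d1, d2, d3⟩ := pvDp1_facts n hn
    exact ⟨d1, d2, fun j hj1 hj2 => d3 j (by omega) (by omega) hj2⟩
  | succ m ih =>
    obtain ⟨ih1, ih2, ih3⟩ := ih (by omega)
    set dpm := (List.range m).foldl (fun (dp : List (List Int)) (k : Nat) => pvOuter dp (1 + (k:Int))) (pvDp1 n) with hdpm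
    have hfold : (List.range (m+1)).foldl (fun (dp : List (List Int)) (k : Nat) => pvOuter dp (1 + (k:Int))) (pvDp1 n)
        = pvOuter dpm (1 + (m:Int)) := by
      rw [List.range_succ, List.foldl_append, List.foldl_cons, List.foldl_nil]
    have hlenZ : ((dpm.length : Int)) = n + 1 := by rw [ih1]; omega
    have hi : (0:Int) ≤ 1 + (m:Int) := by omega
    have hlt : 1 + (m:Int) + 1 < (dpm.length : Int) := by omega
    obtain ⟨g1, g2, g3⟩ := pvInnerFold (PySem.List.pyRange 0 10 1) (1 + (m:Int)) dpm hi hlt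
      (fun x hx => by rw [PySem.List.mem_pyRange_one] at hx; omega)
    have hprev : PySem.List.pyGetD dpm (1 + (m:Int)) [] = pvStep^[m] pvStart := by
      rw [show (1 + (m:Int)) = (m:Int) + 1 by ring, ih2]
    have hzeros : PySem.List.pyGetD dpm (1 + (m:Int) + 1) [] = List.replicate 10 0 :=
      ih3 _ (by omega) (by omega)
    rw [hfold]
    refine ⟨?_, ?_, ?_⟩
    · rw [pvOuter, g1, ih1]
    · rw [show ((m+1:Nat):Int) + 1 = 1 + (m:Int) + 1 by push_cast; ring]
      rw [pvOuter, g2, hprev, hzeros,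
        show PySem.List.pyRange 0 10 1 = [0,1,2,3,4,5,6,7,8,9] from by decide,
        pvRowEval, Function.iterate_succ_apply']
    · intro j hj1 hj2
      have : PySem.List.pyGetD (pvOuter dpm (1 + (m:Int))) j [] = PySem.List.pyGetD dpm j [] := by
        rw [pvOuter]; exact g3 j (by push_cast at hj1 ⊢; omega) (by push_cast at hj1 ⊢; omega)
      rw [this]
      exact ih3 j (by push_cast at hj1 ⊢; omega) hj2

theorem pvAGetD_toList {T : Type} (a : Array T) (i : Nat) (d : T) :
    a.getD i d = a.toList.getD i d := by
  simp only [Array.getD, List.getD]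
  split
  · next h => simp [Array.getElem?_eq_getElem h]
  · next h => simp [Array.getElem?_eq_none (by omega : a.size ≤ i)]

theorem pvAGet_toList (dp : Array (List Int)) (i : Int) (hi : 0 ≤ i) :
    pvAGet dp i = PySem.List.pyGetD dp.toList i [] := by
  rw [PySem.List.pyGetD_of_nonneg _ _ hi, pvAGet, pvAGetD_toList]

theorem pvASet_toList (dp : Array (List Int)) (i : Int) (v : List Int) (hi : 0 ≤ i) :
    (pvASet dp i v).toList = PySem.List.pySetD dp.toList i v := by
  rw [PySem.List.pySetD_of_nonneg _ _ hi, pvASet, Array.toList_setIfInBounds]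

theorem pvFoldl_toList (L : List Int) (f : Array (List Int) → Int → Array (List Int))
    (g : List (List Int) → Int → List (List Int))
    (h : ∀ dp x, x ∈ L → (f dp x).toList = g dp.toList x) (dp : Array (List Int)) :
    (L.foldl f dp).toList = L.foldl g dp.toList := by
  induction L generalizing dp with
  | nil => rfl
  | cons x xs ih =>
    rw [List.foldl_cons, List.foldl_cons,
      ← h dp x List.mem_cons_self,
      ih (fun dp' y hy => h dp' y (List.mem_cons_of_mem _ hy)) (f dp x)]

theorem pvSolve_eq (n : Int) (hn : 1 ≤ n) :
    solve n = PySem.Int.mod ((pvStep^[(n-1).toNat] pvStart).sum) 998244353 := by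
  have hrepr : solve n = PySem.Int.mod (pvAGet
      ((PySem.List.pyRange 1 n 1).foldl
        (fun dp i =>
          (PySem.List.pyRange 0 10 1).foldl
            (fun dp j => pvASet dp (i+1) (PySem.List.pySetD (pvAGet dp (i+1)) j
              (pvV (pvAGet dp i) j))) dp)
        ((PySem.List.pyRange 1 10 1).foldl
          (fun dp i => pvASet dp 1 (PySem.List.pySetD (pvAGet dp 1) i 1))
          ((PySem.List.pyRange 0 (n+1) 1).map (fun _ => List.replicate 10 (0:Int))).toArray))
      n).sum 998244353 := rfl
  have hd1 : ((PySem.List.pyRange 1 10 1).foldl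
      (fun dp i => pvASet dp 1 (PySem.List.pySetD (pvAGet dp 1) i 1))
      ((PySem.List.pyRange 0 (n+1) 1).map (fun _ => List.replicate 10 (0:Int))).toArray).toList
      = pvDp1 n := by
    rw [pvFoldl_toList _ _
      (fun dp i => PySem.List.pySetD dp 1 (PySem.List.pySetD (PySem.List.pyGetD dp 1 []) i 1))
      (fun dp x _ => by
        rw [pvASet_toList _ _ _ (by norm_num), pvAGet_toList _ _ (by norm_num)])]
    rw [show ((PySem.List.pyRange 0 (n+1) 1).map
      (fun _ => List.replicate 10 (0:Int))).toArray.toList = pvDp0 n from by simp [pvDp0]]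
    rfl
  have hd2 : ((PySem.List.pyRange 1 n 1).foldl
      (fun dp i =>
        (PySem.List.pyRange 0 10 1).foldl
          (fun dp j => pvASet dp (i+1) (PySem.List.pySetD (pvAGet dp (i+1)) j
            (pvV (pvAGet dp i) j))) dp)
      ((PySem.List.pyRange 1 10 1).foldl
        (fun dp i => pvASet dp 1 (PySem.List.pySetD (pvAGet dp 1) i 1))
        ((PySem.List.pyRange 0 (n+1) 1).map (fun _ => List.replicate 10 (0:Int))).toArray)).toList
      = (PySem.List.pyRange 1 n 1).foldl pvOuter (pvDp1 n) := by
    rw [pvFoldl_toList _ _ pvOuter (fun dp x hx => by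
        have hx1 : 1 ≤ x := by rw [PySem.List.mem_pyRange_one] at hx; exact hx.1
        rw [pvOuter]
        exact pvFoldl_toList _ _ _ (fun dp' j _ => by
          rw [pvASet_toList _ _ _ (by omega), pvAGet_toList _ _ (by omega),
            pvAGet_toList _ _ (by omega)]) dp), hd1]
  rw [hrepr, pvAGet_toList _ _ (by omega), hd2, PySem.List.pyRange_one 1 n, List.foldl_map]
  obtain ⟨-, h2, -⟩ := pvMain n hn (n-1).toNat (by omega)
  rw [show (((n-1).toNat : Nat) : Int) + 1 = n by omega] at h2
  rw [h2]

def pvBnd (r : List Int) : Prop := r.length = 10 ∧ ∀ x ∈ r, 0 ≤ x ∧ x < 998244353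

theorem pvModId (x : Int) (h1 : 0 ≤ x) (h2 : x < 998244353) :
    PySem.Int.mod x 998244353 = x := by
  rw [PySem.Int.mod_eq_emod_of_pos (by norm_num : (0:Int) < 998244353)]
  exact Int.emod_eq_of_lt h1 h2

theorem pvStep_eq (r : List Int) (hb : pvBnd r) : pvStep r = pvApply pvMlit r := by
  obtain ⟨hl, hbd⟩ := hb
  obtain ⟨r0,r1,r2,r3,r4,r5,r6,r7,r8,r9,rfl⟩ := pvLen10 r hl
  have h1 := hbd r1 (by simp)
  have h8 := hbd r8 (by simp)
  simp only [pvStep, pvApply, pvMlit, pvDot, List.zipWith, List.map_cons, List.map_nil,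
    List.sum_cons, List.sum_nil, PySem.List.pyGetD_ofNat', List.getD, List.getElem?_cons_zero,
    List.getElem?_cons_succ, Option.getD_some, zero_mul, one_mul, add_zero, zero_add,
    List.cons.injEq, and_true, true_and]
  exact ⟨(pvModId r1 h1.1 h1.2).symm, (pvModId r8 h8.1 h8.2).symm⟩

theorem pvBnd_step (r : List Int) (hb : pvBnd r) : pvBnd (pvStep r) := by
  obtain ⟨hl, hbd⟩ := hb
  obtain ⟨r0,r1,r2,r3,r4,r5,r6,r7,r8,r9,rfl⟩ := pvLen10 r hl
  have h1 := hbd r1 (by simp)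
  have h8 := hbd r8 (by simp)
  refine ⟨rfl, ?_⟩
  intro x hx
  have hmod : ∀ y : Int, 0 ≤ PySem.Int.mod y 998244353 ∧ PySem.Int.mod y 998244353 < 998244353 := by
    intro y
    rw [PySem.Int.mod_eq_emod_of_pos (by norm_num : (0:Int) < 998244353)]
    exact ⟨Int.emod_nonneg y (by norm_num), Int.emod_lt_of_pos y (by norm_num)⟩
  simp only [pvStep, PySem.List.pyGetD_ofNat', List.getD, List.getElem?_cons_zero,
    List.getElem?_cons_succ, Option.getD_some, List.mem_cons, List.not_mem_nil, or_false] at hx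
  rcases hx with h|h|h|h|h|h|h|h|h|h <;> subst h
  · exact h1
  all_goals first
    | exact hmod _
    | exact h8

theorem pvIter_step_eq (k : Nat) :
    pvStep^[k] pvStart = (fun u => pvApply pvMlit u)^[k] pvStart ∧ pvBnd (pvStep^[k] pvStart) := by
  induction k with
  | zero => exact ⟨rfl, by constructor <;> decide⟩
  | succ m ih =>
    obtain ⟨ih1, ih2⟩ := ih
    constructor
    · rw [Function.iterate_succ_apply', Function.iterate_succ_apply', pvStep_eq _ ih2, ih1]
    · rw [Function.iterate_succ_apply']
      exact pvBnd_step _ ih2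

theorem pvSolveAlt_eq (n : Int) :
    solve_alt n = PySem.Int.mod (((fun u => pvApply pvMlit u)^[(n-1).toNat] pvStart).sum) 998244353 := by
  have hM : ((PySem.List.pyRange 0 10 1).map (fun i =>
      (PySem.List.pyRange 0 10 1).map (fun j => if ((i:Int) - j).natAbs = 1 then (1:Int) else 0)))
      = pvMlit := by decide
  have hs : ([0] ++ List.replicate 9 (1:Int)) = pvStart := by decide
  have hrepr : solve_alt n = PySem.Int.mod (((PySem.List.pyRange 0 10 1).map (fun i =>
      PySem.Int.mod (((PySem.List.pyRange 0 10 1).map (fun j =>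
        PySem.List.pyGetD (PySem.List.pyGetD (pvMatpowN ((PySem.List.pyRange 0 10 1).map (fun i =>
          (PySem.List.pyRange 0 10 1).map (fun j => if ((i:Int) - j).natAbs = 1 then (1:Int) else 0)))
          (n-1).toNat) i []) j 0 * PySem.List.pyGetD ([0] ++ List.replicate 9 (1:Int)) j 0)).sum)
        998244353)).sum) 998244353 := rfl
  rw [hrepr, hM, hs]
  have hSh := pvShape_matpow pvMlit (n-1).toNat
  rw [pvMapPyRange10 (fun r => PySem.Int.mod (((PySem.List.pyRange 0 10 1).map (fun j =>
    PySem.List.pyGetD r j 0 * PySem.List.pyGetD pvStart j 0)).sum) 998244353) _ hSh.1]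
  have hconv : (pvMatpowN pvMlit (n-1).toNat).map (fun r => PySem.Int.mod
      (((PySem.List.pyRange 0 10 1).map (fun j =>
        PySem.List.pyGetD r j 0 * PySem.List.pyGetD pvStart j 0)).sum) 998244353)
      = pvApply (pvMatpowN pvMlit (n-1).toNat) pvStart := by
    apply List.map_congr_left
    intro r hr
    rw [pvSum_pyRange_getD r pvStart (hSh.2 r hr) (by decide)]
  rw [hconv, pvMatpow_apply _ pvStart (by decide),
    show pvStart.map (fun t => PySem.Int.mod t 998244353) = pvStart from by decide]

-- ===== VERDICT (by name: the statement is the Claim_ definition above) =====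
theorem solve_spec : Claim_equal_solve := by
  intro n _ hn
  unfold Spec_solve
  rw [pvSolve_eq n hn, pvSolveAlt_eq n, (pvIter_step_eq (n-1).toNat).1]
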